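-- pv_equiv track=rewrite | github.com/chipfoundry/cf-precheck | src/cf_precheck/checks/_oeb_report.py | _split_gpio_rows_and_messages
-- ===== SOURCE A (Python) =====
-- CARAVEL_HEADER_PREFIX = "gpio/user/analog"
--
-- OPENFRAME_HEADER_PREFIX = "gpio |"
--
-- OPENFRAME_HEADER_MARKER = "Configuration (dm[2:0]"
--
-- def _clean(line: str) -> str:
--     return line.rstrip("\r\n").rstrip()
--
-- def _split_gpio_rows_and_messages(lines: list[str]) -> tuple[list[str], list[str], bool]:
--     """Return (row_lines, message_lines, has_explicit_no_issues_marker).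
--
--     Rows appear after the header and before either the "No warnings or errors"
--     line or the "*** Detected ..." banner. Messages appear after the banner.
--     """
--     row_lines: list[str] = []
--     message_lines: list[str] = []
--     header_seen = False
--     in_messages = False
--     no_issues_seen = False
--
--     for raw in lines:
--         line = _clean(raw)
--         stripped = line.strip()
--         if not header_seen:
--             if (
--                 CARAVEL_HEADER_PREFIX in stripped
--                 or OPENFRAME_HEADER_MARKER in stripped
--                 or (stripped.startswith(OPENFRAME_HEADER_PREFIX) and "Configuration" in stripped)
--             ):
--                 header_seen = True
--             continue
--
--         if not stripped:
--             continue
--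
--         if stripped.startswith("***") and "Detected" in stripped:
--             in_messages = True
--             continue
--
--         if stripped == "No warnings or errors detected":
--             no_issues_seen = True
--             in_messages = True
--             continue
--
--         if in_messages:
--             message_lines.append(line)
--         else:
--             row_lines.append(line)
--
--     return row_lines, message_lines, no_issues_seen
-- ===== SOURCE B (Python) =====
-- CARAVEL_HEADER_PREFIX = "gpio/user/analog"
--
-- OPENFRAME_HEADER_PREFIX = "gpio |"
--
-- OPENFRAME_HEADER_MARKER = "Configuration (dm[2:0]"
--
-- def _clean(line: str) -> str:
--     return line.rstrip("\r\n").rstrip()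
--
-- def _is_header(line: str) -> bool:
--     st = line.strip()
--     return (
--         CARAVEL_HEADER_PREFIX in st
--         or OPENFRAME_HEADER_MARKER in st
--         or (st.startswith(OPENFRAME_HEADER_PREFIX) and "Configuration" in st)
--     )
--
-- def _is_split(line: str) -> bool:
--     st = line.strip()
--     return (st.startswith("***") and "Detected" in st) or st == "No warnings or errors detected"
--
-- def _split_gpio_rows_and_messages(lines: list[str]) -> tuple[list[str], list[str], bool]:
--     cleaned = [_clean(l) for l in lines]
--     hi = next((i for i, l in enumerate(cleaned) if _is_header(l)), None)
--     if hi is None: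
--         return [], [], False
--     tail = cleaned[hi + 1:]
--     no_issues = any(l.strip() == "No warnings or errors detected" for l in tail)
--     si = next((i for i, l in enumerate(tail) if _is_split(l)), None)
--     if si is None:
--         return [l for l in tail if l.strip()], [], no_issues
--     rows = [l for l in tail[:si] if l.strip()]
--     msgs = [l for l in tail[si + 1:] if l.strip() and not _is_split(l)]
--     return rows, msgs, no_issues
-- ===== Notes on version B (the rewrite author's own statement) =====
-- stated objective: simpler
-- what changed: Replaced A's single stateful loop (header_seen/in_messages flags, accumulators) with a flag-free decomposition: clean all lines, find the header line, find the first split line in the tail, and build rows/messages/no_issues by take/drop slices, filters and an any() scan.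
import Mathlib
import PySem

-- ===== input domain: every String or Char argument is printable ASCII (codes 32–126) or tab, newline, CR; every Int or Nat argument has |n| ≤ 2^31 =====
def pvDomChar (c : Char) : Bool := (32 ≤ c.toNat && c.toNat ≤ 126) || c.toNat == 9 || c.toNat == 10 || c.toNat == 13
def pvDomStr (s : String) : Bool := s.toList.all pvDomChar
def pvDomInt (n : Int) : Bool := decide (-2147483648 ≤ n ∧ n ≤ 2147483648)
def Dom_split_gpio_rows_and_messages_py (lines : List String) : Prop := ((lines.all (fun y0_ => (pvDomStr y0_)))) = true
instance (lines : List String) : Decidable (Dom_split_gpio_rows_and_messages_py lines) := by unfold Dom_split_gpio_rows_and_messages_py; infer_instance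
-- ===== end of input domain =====

-- B re-decomposes A's single stateful loop into find-the-header / find-the-split / filter passes (objective: simpler decomposition, same cost).

-- shared module constants (verbatim from the Python module) and the shared helper _clean
def caravelHeaderPrefix : List Char := "gpio/user/analog".toList
def openframeHeaderPrefix : List Char := "gpio |".toList
def openframeHeaderMarker : List Char := "Configuration (dm[2:0]".toList
def noIssuesLine : List Char := "No warnings or errors detected".toList

-- _clean: line.rstrip("\r\n").rstrip().  rstrip("\r\n") has no PySem primitive; ported by hand
-- (drop trailing '\r'/'\n' characters), exact for this two-character strip set; then PySem rstrip.
def pyCleanChars (s : String) : List Char :=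
  PySem.Chars.rstrip ((s.toList.reverse.dropWhile (fun c => c == '\r' || c == '\n')).reverse)

-- ===== PORT A =====
def aLoop : List String → List String → List String → Bool → Bool → Bool → List String × List String × Bool
  | [], rows, msgs, _hs, _im, ni => (rows, msgs, ni)
  | raw :: rest, rows, msgs, hs, im, ni =>
    let line := pyCleanChars raw
    let stripped := PySem.Chars.strip line
    if hs = false then
      if PySem.Chars.isIn caravelHeaderPrefix stripped
          || PySem.Chars.isIn openframeHeaderMarker stripped
          || (PySem.Chars.startswith stripped openframeHeaderPrefix
              && PySem.Chars.isIn "Configuration".toList stripped) then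
        aLoop rest rows msgs true im ni
      else
        aLoop rest rows msgs hs im ni
    else if stripped == ([] : List Char) then
      aLoop rest rows msgs hs im ni
    else if PySem.Chars.startswith stripped "***".toList
            && PySem.Chars.isIn "Detected".toList stripped then
      aLoop rest rows msgs hs true ni
    else if stripped == noIssuesLine then
      aLoop rest rows msgs hs true true
    else if im then
      aLoop rest rows (msgs ++ [String.ofList line]) hs im ni
    else
      aLoop rest (rows ++ [String.ofList line]) msgs hs im ni

def split_gpio_rows_and_messages_py (lines : List String) : List String × List String × Bool :=
  aLoop lines [] [] false false false

-- ===== PORT B =====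
def bIsHeader (l : List Char) : Bool :=
  let st := PySem.Chars.strip l
  PySem.Chars.isIn caravelHeaderPrefix st
    || PySem.Chars.isIn openframeHeaderMarker st
    || (PySem.Chars.startswith st openframeHeaderPrefix
        && PySem.Chars.isIn "Configuration".toList st)

def bIsSplit (l : List Char) : Bool :=
  let st := PySem.Chars.strip l
  (PySem.Chars.startswith st "***".toList && PySem.Chars.isIn "Detected".toList st)
    || st == noIssuesLine

def split_gpio_rows_and_messages_py_alt (lines : List String) : List String × List String × Bool :=
  let cleaned := lines.map pyCleanChars
  match List.findIdx? bIsHeader cleaned with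
  | none => ([], [], false)
  | some hi =>
    let tail := cleaned.drop (hi + 1)
    let noIssues := tail.any (fun l => PySem.Chars.strip l == noIssuesLine)
    match List.findIdx? bIsSplit tail with
    | none =>
      ((tail.filter (fun l => !(PySem.Chars.strip l == ([] : List Char)))).map String.ofList,
       [], noIssues)
    | some si =>
      (((tail.take si).filter (fun l => !(PySem.Chars.strip l == ([] : List Char)))).map String.ofList,
       ((tail.drop (si + 1)).filter
           (fun l => !(PySem.Chars.strip l == ([] : List Char)) && !bIsSplit l)).map String.ofList,
       noIssues)

-- ===== PRECONDITION & SPEC =====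
def Spec_split_gpio_rows_and_messages_py (lines : List String) (out : List String × List String × Bool) : Prop := out = split_gpio_rows_and_messages_py_alt lines
instance (lines : List String) (out : List String × List String × Bool) : Decidable (Spec_split_gpio_rows_and_messages_py lines out) := by unfold Spec_split_gpio_rows_and_messages_py; infer_instance

-- ===== CLAIM (what is proved, stated in full; the proofs are below) =====
def Claim_equal_split_gpio_rows_and_messages_py : Prop := ∀ (lines : List String), Dom_split_gpio_rows_and_messages_py lines → Spec_split_gpio_rows_and_messages_py lines (split_gpio_rows_and_messages_py lines)

-- ===== LEMMAS AND PROOFS =====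

-- proof-side recursive characterisation of the tail (after-header) region
def tRows : List (List Char) → List (List Char)
  | [] => []
  | l :: ls =>
    if PySem.Chars.strip l == ([] : List Char) then tRows ls
    else if bIsSplit l then []
    else l :: tRows ls

def tMsgs : List (List Char) → List (List Char)
  | [] => []
  | l :: ls =>
    if PySem.Chars.strip l == ([] : List Char) then tMsgs ls
    else if bIsSplit l then
      ls.filter (fun x => !(PySem.Chars.strip x == ([] : List Char)) && !bIsSplit x)
    else tMsgs ls

def tNi (ls : List (List Char)) : Bool := ls.any (fun l => PySem.Chars.strip l == noIssuesLine)

theorem blank_not_split (l : List Char) (h : (PySem.Chars.strip l == ([] : List Char)) = true) :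
    bIsSplit l = false := by
  rw [beq_iff_eq] at h
  simp only [bIsSplit, h]
  decide

-- msgs-mode invariant
theorem aLoop_msgs (ls : List String) (rows msgs : List String) (ni : Bool) :
    aLoop ls rows msgs true true ni =
      (rows,
       msgs ++ ((ls.map pyCleanChars).filter
          (fun x => !(PySem.Chars.strip x == ([] : List Char)) && !bIsSplit x)).map String.ofList,
       ni || tNi (ls.map pyCleanChars)) := by
  induction ls generalizing msgs ni with
  | nil => simp [aLoop, tNi]
  | cons raw rest ih =>
    simp only [aLoop, List.map_cons, List.filter_cons, tNi, List.any_cons, Bool.true_eq_false, if_true, if_false]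
    by_cases h1 : (PySem.Chars.strip (pyCleanChars raw) == ([] : List Char)) = true
    · have h3 : (PySem.Chars.strip (pyCleanChars raw) == noIssuesLine) = false := by
        rw [beq_iff_eq] at h1; rw [h1]; decide
      simp only [h1, blank_not_split _ h1, if_true, Bool.not_true, Bool.false_and, if_false, h3,
        Bool.false_or, Bool.false_eq_true, if_true, if_false]
      exact ih msgs ni
    · rw [if_neg h1]
      have h1f : (PySem.Chars.strip (pyCleanChars raw) == ([] : List Char)) = false :=
        Bool.eq_false_iff.mpr h1
      by_cases h2 : (PySem.Chars.startswith (PySem.Chars.strip (pyCleanChars raw)) "***".toList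
            && PySem.Chars.isIn "Detected".toList (PySem.Chars.strip (pyCleanChars raw))) = true
      · have hsp : bIsSplit (pyCleanChars raw) = true := by
          simp only [bIsSplit]; rw [h2]; rfl
        have h3 : (PySem.Chars.strip (pyCleanChars raw) == noIssuesLine) = false := by
          by_contra hc
          rw [Bool.not_eq_false, beq_iff_eq] at hc
          rw [hc] at h2; exact absurd h2 (by decide)
        simp only [h2, if_true, hsp, Bool.not_true, Bool.and_false, if_false, h3, Bool.false_or, Bool.false_eq_true, if_true, if_false]
        exact ih msgs ni
      · rw [if_neg h2]
        have h2f := Bool.eq_false_iff.mpr h2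
        by_cases h3 : (PySem.Chars.strip (pyCleanChars raw) == noIssuesLine) = true
        · have hsp : bIsSplit (pyCleanChars raw) = true := by
            simp only [bIsSplit]; rw [h3]; simp
          simp only [h3, if_true, hsp, Bool.not_true, Bool.and_false, if_false, Bool.true_or, Bool.false_eq_true, if_true, if_false]
          rw [ih msgs true]
          simp only [Bool.true_or, Bool.or_true]
        · rw [if_neg h3]
          have h3f := Bool.eq_false_iff.mpr h3
          have hsp : bIsSplit (pyCleanChars raw) = false := by
            simp only [bIsSplit]; rw [h2f, h3f]; rfl
          simp only [if_true, h1f, hsp, Bool.not_false, Bool.and_true, h3f, Bool.false_or,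
            List.map_cons, if_true]
          rw [ih (msgs ++ [String.ofList (pyCleanChars raw)]) ni]
          simp only [List.append_assoc, List.singleton_append, tNi]

-- rows-mode invariant
theorem aLoop_rows (ls : List String) (rows msgs : List String) (ni : Bool) :
    aLoop ls rows msgs true false ni =
      (rows ++ (tRows (ls.map pyCleanChars)).map String.ofList,
       msgs ++ (tMsgs (ls.map pyCleanChars)).map String.ofList,
       ni || tNi (ls.map pyCleanChars)) := by
  induction ls generalizing rows ni with
  | nil => simp [aLoop, tRows, tMsgs, tNi]
  | cons raw rest ih =>
    simp only [aLoop, List.map_cons, tRows, tMsgs, tNi, List.any_cons, Bool.true_eq_false, Bool.false_eq_true, if_false]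
    by_cases h1 : (PySem.Chars.strip (pyCleanChars raw) == ([] : List Char)) = true
    · have h3 : (PySem.Chars.strip (pyCleanChars raw) == noIssuesLine) = false := by
        rw [beq_iff_eq] at h1; rw [h1]; decide
      simp only [h1, if_true, h3, Bool.false_or, Bool.false_eq_true, if_true, if_false]
      exact ih rows ni
    · rw [if_neg h1]
      have h1f : (PySem.Chars.strip (pyCleanChars raw) == ([] : List Char)) = false :=
        Bool.eq_false_iff.mpr h1
      by_cases h2 : (PySem.Chars.startswith (PySem.Chars.strip (pyCleanChars raw)) "***".toList
            && PySem.Chars.isIn "Detected".toList (PySem.Chars.strip (pyCleanChars raw))) = true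
      · have hsp : bIsSplit (pyCleanChars raw) = true := by
          simp only [bIsSplit]; rw [h2]; rfl
        have h3 : (PySem.Chars.strip (pyCleanChars raw) == noIssuesLine) = false := by
          by_contra hc
          rw [Bool.not_eq_false, beq_iff_eq] at hc
          rw [hc] at h2; exact absurd h2 (by decide)
        simp only [h2, if_true, hsp, h1f, if_false, h3, Bool.false_or, Bool.false_eq_true, if_true, if_false]
        rw [aLoop_msgs]
        simp only [List.map_nil, List.append_nil, tNi]
      · rw [if_neg h2]
        have h2f := Bool.eq_false_iff.mpr h2
        by_cases h3 : (PySem.Chars.strip (pyCleanChars raw) == noIssuesLine) = true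
        · have hsp : bIsSplit (pyCleanChars raw) = true := by
            simp only [bIsSplit]; rw [h3]; simp
          simp only [h3, if_true, hsp, h1f, if_false, Bool.true_or, Bool.false_eq_true, if_true, if_false]
          rw [aLoop_msgs]
          simp only [List.map_nil, List.append_nil, Bool.true_or, Bool.or_true, tNi]
        · rw [if_neg h3]
          have h3f := Bool.eq_false_iff.mpr h3
          have hsp : bIsSplit (pyCleanChars raw) = false := by
            simp only [bIsSplit]; rw [h2f, h3f]; rfl
          simp only [h1f, hsp, if_false, h3f, Bool.false_or, List.map_cons, Bool.false_eq_true, if_false]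
          rw [ih (rows ++ [String.ofList (pyCleanChars raw)]) ni]
          simp only [List.append_assoc, List.singleton_append, tNi]

-- header-search phase
theorem aLoop_header (ls : List String) :
    aLoop ls [] [] false false false =
      (match List.findIdx? bIsHeader (ls.map pyCleanChars) with
       | none => ([], [], false)
       | some hi =>
         let t := (ls.map pyCleanChars).drop (hi + 1)
         ((tRows t).map String.ofList, (tMsgs t).map String.ofList, tNi t)) := by
  induction ls with
  | nil => simp [aLoop]
  | cons raw rest ih =>
    simp only [aLoop, List.map_cons, List.findIdx?_cons, Bool.false_eq_true, if_true, if_false]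
    by_cases hh : bIsHeader (pyCleanChars raw) = true
    · have hh' := hh
      simp only [bIsHeader] at hh'
      simp only [hh', if_true, hh, if_true]
      rw [aLoop_rows]
      simp only [List.nil_append, Bool.false_or, List.drop_succ_cons, List.drop_zero]
    · have hhf := Bool.eq_false_iff.mpr hh
      have hh' := hhf
      simp only [bIsHeader] at hh'
      simp only [hh', hhf, Bool.false_eq_true, if_false, Bool.false_eq_true, if_false]
      rw [ih]
      cases hfi : List.findIdx? bIsHeader (rest.map pyCleanChars) with
      | none => simp
      | some hi => simp [List.drop_succ_cons]

-- B side: the find/take/drop/filter expressions compute tRows/tMsgs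
theorem tRows_of_find_none (t : List (List Char)) (h : List.findIdx? bIsSplit t = none) :
    tRows t = t.filter (fun l => !(PySem.Chars.strip l == ([] : List Char))) ∧ tMsgs t = [] := by
  induction t with
  | nil => simp [tRows, tMsgs]
  | cons l ls ih =>
    rw [List.findIdx?_cons] at h
    by_cases hs : bIsSplit l = true
    · simp [hs] at h
    · rw [if_neg hs, Option.map_eq_none_iff] at h
      obtain ⟨ihr, ihm⟩ := ih h
      have hsf := Bool.eq_false_iff.mpr hs
      refine ⟨?_, ?_⟩
      · simp only [tRows, List.filter_cons, hsf, Bool.false_eq_true, if_false, Bool.false_eq_true, if_false]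
        by_cases h1 : (PySem.Chars.strip l == ([] : List Char)) = true
        · simp [h1, ihr]
        · simp [Bool.eq_false_iff.mpr h1, ihr]
      · simp only [tMsgs, hsf, Bool.false_eq_true, if_false, Bool.false_eq_true, if_false]
        split
        · exact ihm
        · exact ihm

theorem tRows_of_find_some (t : List (List Char)) (si : Nat)
    (h : List.findIdx? bIsSplit t = some si) :
    tRows t = (t.take si).filter (fun l => !(PySem.Chars.strip l == ([] : List Char))) ∧
    tMsgs t = (t.drop (si + 1)).filter
        (fun l => !(PySem.Chars.strip l == ([] : List Char)) && !bIsSplit l) := by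
  induction t generalizing si with
  | nil => simp at h
  | cons l ls ih =>
    rw [List.findIdx?_cons] at h
    by_cases hs : bIsSplit l = true
    · rw [if_pos hs] at h
      cases h
      have h1 : (PySem.Chars.strip l == ([] : List Char)) = false := by
        by_contra hc
        rw [Bool.not_eq_false] at hc
        rw [blank_not_split _ hc] at hs; exact absurd hs (by decide)
      constructor
      · simp [tRows, h1, hs]
      · simp [tMsgs, h1, hs]
    · rw [if_neg hs] at h
      obtain ⟨si', hsi', rfl⟩ := Option.map_eq_some_iff.mp h
      obtain ⟨ihr, ihm⟩ := ih si' hsi'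
      have hsf := Bool.eq_false_iff.mpr hs
      refine ⟨?_, ?_⟩
      · simp only [tRows, hsf, Bool.false_eq_true, if_false, List.take_succ_cons, List.filter_cons, Bool.false_eq_true, if_false]
        by_cases h1 : (PySem.Chars.strip l == ([] : List Char)) = true
        · simp [h1, ihr]
        · simp [Bool.eq_false_iff.mpr h1, ihr]
      · simp only [tMsgs, hsf, Bool.false_eq_true, if_false, List.drop_succ_cons, Bool.false_eq_true, if_false]
        split
        · exact ihm
        · exact ihm

-- ===== VERDICT (by name: the statement is the Claim_ definition above) =====
theorem split_gpio_rows_and_messages_py_spec : Claim_equal_split_gpio_rows_and_messages_py := by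
  intro lines _dom
  unfold Spec_split_gpio_rows_and_messages_py
  simp only [split_gpio_rows_and_messages_py, split_gpio_rows_and_messages_py_alt]
  rw [aLoop_header]
  cases hfi : List.findIdx? bIsHeader (lines.map pyCleanChars) with
  | none => rfl
  | some hi =>
    simp only
    cases hsi : List.findIdx? bIsSplit ((lines.map pyCleanChars).drop (hi + 1)) with
    | none =>
      obtain ⟨hr, hm⟩ := tRows_of_find_none _ hsi
      rw [hr, hm]
      rfl
    | some si =>
      obtain ⟨hr, hm⟩ := tRows_of_find_some _ _ hsi
      simp only [hr, hm, tNi, List.drop_drop]
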